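-- pv_equiv track=rewrite | github.com/10thSSAFY/codingTest | Python/백준/Silver/2579. 계단 오르기/계단 오르기.py | max_score_of_stairs
-- ===== SOURCE A (Python) =====
-- def max_score_of_stairs(stairs):
--     n = len(stairs)
--
--     if n == 0:
--         return 0
--     elif n == 1:
--         return stairs[0]
--     elif n == 2:
--         return stairs[0] + stairs[1]
--
--     # 각 계단을 오르는 최대값을 저장할 변수
--     dp = [0] * n
--     # 첫번째 계단까지의 최대값
--     dp[0] = stairs[0]
--     # 두번째 계단까지의 최대값
--     dp[1] = stairs[0] + stairs[1]
--     # 세번째 계단까지의 최대값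
--     dp[2] = max(stairs[0] + stairs[2], stairs[1] + stairs[2])
--
--     # 네번째부터 마지막까지 반복하며, 각 계단의 최대값 구하기
--     for i in range(3, n):
--         dp[i] = max(dp[i - 2], dp[i - 3] + stairs[i - 1]) + stairs[i]
--
--     return dp[-1]
-- ===== SOURCE B (Python) =====
-- def max_score_of_stairs(stairs):
--     # Complement view: answer = total of all stairs minus the cheapest legal
--     # set of SKIPPED stairs (a skip DP with min), instead of A's max-DP over
--     # scores of stepped stairs.
--     n = len(stairs)
--     if n == 0:
--         return 0
--     if n == 1:
--         return stairs[0]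
--     if n == 2:
--         return stairs[0] + stairs[1]
--     # skip[i] = minimum total of skipped stairs when stair i is the latest skip
--     # (consecutive skips must be 2 or 3 apart; the first skip is at index <= 2).
--     skip = stairs[: n - 1][:3]
--     for i in range(3, n - 1):
--         skip.append(stairs[i] + min(skip[i - 2], skip[i - 3]))
--     # the last skipped stair must be n-2 or n-3 (stair n-1 is always stepped on)
--     return sum(stairs) - min(skip[-1], skip[-2])
-- ===== Notes on version B (the rewrite author's own statement) =====
-- stated objective: alternative
-- what changed: Replaces A's maximizing DP over scores of stepped-on stairs with the complement formulation: the total sum of all stairs minus a minimizing DP over the stairs that are skipped (skip[i] = cheapest skip pattern whose latest skip is stair i), subtracting the cheapest legal skip total at the end.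
import Mathlib
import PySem

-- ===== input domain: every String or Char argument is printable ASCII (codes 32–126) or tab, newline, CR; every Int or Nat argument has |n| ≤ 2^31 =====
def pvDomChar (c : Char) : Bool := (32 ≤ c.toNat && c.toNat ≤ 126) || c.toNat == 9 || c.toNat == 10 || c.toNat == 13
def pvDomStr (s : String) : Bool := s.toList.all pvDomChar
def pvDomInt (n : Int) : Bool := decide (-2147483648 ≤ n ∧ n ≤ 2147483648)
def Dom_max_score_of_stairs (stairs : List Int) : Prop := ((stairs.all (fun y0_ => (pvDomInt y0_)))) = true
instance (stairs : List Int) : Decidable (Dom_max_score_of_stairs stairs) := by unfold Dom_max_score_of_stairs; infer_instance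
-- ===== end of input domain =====

-- B computes the same answer via the complement: total sum minus a minimizing DP
-- over legally skipped stairs, instead of A's maximizing DP over stepped stairs.

-- ===== PORT A =====
def max_score_of_stairs (stairs : List Int) : Int :=
  let n : Int := (stairs.length : Int)
  if n == 0 then 0
  else if n == 1 then PySem.List.pyGetD stairs 0 0
  else if n == 2 then PySem.List.pyGetD stairs 0 0 + PySem.List.pyGetD stairs 1 0
  else
    let dp : List Int := List.replicate stairs.length 0
    let dp := PySem.List.pySetD dp 0 (PySem.List.pyGetD stairs 0 0)
    let dp := PySem.List.pySetD dp 1 (PySem.List.pyGetD stairs 0 0 + PySem.List.pyGetD stairs 1 0)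
    let dp := PySem.List.pySetD dp 2 (max (PySem.List.pyGetD stairs 0 0 + PySem.List.pyGetD stairs 2 0)
                                          (PySem.List.pyGetD stairs 1 0 + PySem.List.pyGetD stairs 2 0))
    let dp := (PySem.List.pyRange 3 n 1).foldl (fun dp i =>
        PySem.List.pySetD dp i
          (max (PySem.List.pyGetD dp (i - 2) 0)
               (PySem.List.pyGetD dp (i - 3) 0 + PySem.List.pyGetD stairs (i - 1) 0)
           + PySem.List.pyGetD stairs i 0)) dp
    PySem.List.pyGetD dp (-1) 0

-- ===== PORT B =====
def max_score_of_stairs_alt (stairs : List Int) : Int :=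
  let n : Int := (stairs.length : Int)
  if n == 0 then 0
  else if n == 1 then PySem.List.pyGetD stairs 0 0
  else if n == 2 then PySem.List.pyGetD stairs 0 0 + PySem.List.pyGetD stairs 1 0
  else
    -- skip[i] = minimum total of skipped stairs when stair i is the latest skip
    let skip := PySem.List.slice (PySem.List.slice stairs none (some (n - 1))) none (some 3)
    let skip := (PySem.List.pyRange 3 (n - 1) 1).foldl (fun skip i =>
        skip ++ [PySem.List.pyGetD stairs i 0
                  + min (PySem.List.pyGetD skip (i - 2) 0) (PySem.List.pyGetD skip (i - 3) 0)]) skip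
    stairs.sum - min (PySem.List.pyGetD skip (-1) 0) (PySem.List.pyGetD skip (-2) 0)

-- ===== PRECONDITION & SPEC =====
def Spec_max_score_of_stairs (stairs : List Int) (out : Int) : Prop := out = max_score_of_stairs_alt stairs
instance (stairs : List Int) (out : Int) : Decidable (Spec_max_score_of_stairs stairs out) := by unfold Spec_max_score_of_stairs; infer_instance

-- ===== CLAIM (what is proved, stated in full; the proofs are below) =====
def Claim_equal_max_score_of_stairs : Prop := ∀ (stairs : List Int), Dom_max_score_of_stairs stairs → Spec_max_score_of_stairs stairs (max_score_of_stairs stairs)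

-- ===== LEMMAS AND PROOFS =====

-- reference recursion for A: the value A stores in dp[j]
def dpF (stairs : List Int) : Nat → Int
  | 0 => stairs.getD 0 0
  | 1 => stairs.getD 0 0 + stairs.getD 1 0
  | 2 => max (stairs.getD 0 0 + stairs.getD 2 0) (stairs.getD 1 0 + stairs.getD 2 0)
  | (k + 3) => max (dpF stairs (k + 1)) (dpF stairs k + stairs.getD (k + 2) 0) + stairs.getD (k + 3) 0

-- reference recursion for B: minimum skipped total with latest skip at the given index
def mF (stairs : List Int) : Nat → Int
  | 0 => stairs.getD 0 0
  | 1 => stairs.getD 1 0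
  | 2 => stairs.getD 2 0
  | (k + 3) => stairs.getD (k + 3) 0 + min (mF stairs (k + 1)) (mF stairs k)

lemma aloop (stairs : List Int) (hn : 3 ≤ stairs.length) :
    ∀ (m : Nat), 3 ≤ m → m ≤ stairs.length →
      (((PySem.List.pyRange 3 (m : Int) 1).foldl (fun dp i =>
        PySem.List.pySetD dp i
          (max (PySem.List.pyGetD dp (i - 2) 0)
               (PySem.List.pyGetD dp (i - 3) 0 + PySem.List.pyGetD stairs (i - 1) 0)
           + PySem.List.pyGetD stairs i 0))
        (PySem.List.pySetD (PySem.List.pySetD (PySem.List.pySetD (List.replicate stairs.length 0)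
            0 (PySem.List.pyGetD stairs 0 0))
            1 (PySem.List.pyGetD stairs 0 0 + PySem.List.pyGetD stairs 1 0))
            2 (max (PySem.List.pyGetD stairs 0 0 + PySem.List.pyGetD stairs 2 0)
                   (PySem.List.pyGetD stairs 1 0 + PySem.List.pyGetD stairs 2 0)))).length = stairs.length)
      ∧ ∀ j < m,
      ((PySem.List.pyRange 3 (m : Int) 1).foldl (fun dp i =>
        PySem.List.pySetD dp i
          (max (PySem.List.pyGetD dp (i - 2) 0)
               (PySem.List.pyGetD dp (i - 3) 0 + PySem.List.pyGetD stairs (i - 1) 0)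
           + PySem.List.pyGetD stairs i 0))
        (PySem.List.pySetD (PySem.List.pySetD (PySem.List.pySetD (List.replicate stairs.length 0)
            0 (PySem.List.pyGetD stairs 0 0))
            1 (PySem.List.pyGetD stairs 0 0 + PySem.List.pyGetD stairs 1 0))
            2 (max (PySem.List.pyGetD stairs 0 0 + PySem.List.pyGetD stairs 2 0)
                   (PySem.List.pyGetD stairs 1 0 + PySem.List.pyGetD stairs 2 0)))).getD j 0
      = dpF stairs j := by
  intro m hm
  induction m, hm using Nat.le_induction with
  | base =>
    intro _
    rw [show ((3:Nat):Int) = 3 by norm_num, PySem.List.pyRange_one_eq_nil (le_refl 3)]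
    simp only [List.foldl_nil]
    constructor
    · simp [PySem.List.pySetD_of_nonneg]
    · intro j hj
      have g0 : PySem.List.pyGetD stairs 0 0 = stairs.getD 0 0 := PySem.List.pyGetD_zero stairs 0
      have g1 : PySem.List.pyGetD stairs 1 0 = stairs.getD 1 0 := by
        have := PySem.List.pyGetD_natCast stairs 1 0; simpa using this
      have g2 : PySem.List.pyGetD stairs 2 0 = stairs.getD 2 0 := by
        have := PySem.List.pyGetD_natCast stairs 2 0; simpa using this
      have l0 : 0 < stairs.length := by omega
      have l1 : 1 < stairs.length := by omega
      have l2 : 2 < stairs.length := by omega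
      interval_cases j <;>
        simp [PySem.List.pySetD_of_nonneg, List.getD, g0, g1, g2, dpF, l0, l1, l2]
  | succ m hm ih =>
    intro hle
    obtain ⟨hlen, hinv⟩ := ih (by omega)
    rw [show (((m+1:Nat)):Int) = ((m:Nat):Int) + 1 by push_cast; ring,
        PySem.List.pyRange_one_succ_right (by omega), List.foldl_append, List.foldl_cons,
        List.foldl_nil]
    have e2 : ((m:Int) - 2) = (((m-2:Nat)):Int) := by omega
    have e3 : ((m:Int) - 3) = (((m-3:Nat)):Int) := by omega
    have e1 : ((m:Int) - 1) = (((m-1:Nat)):Int) := by omega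
    rw [e2, e3, e1, PySem.List.pySetD_natCast, PySem.List.pyGetD_natCast,
        PySem.List.pyGetD_natCast, PySem.List.pyGetD_natCast, PySem.List.pyGetD_natCast,
        hinv (m-2) (by omega), hinv (m-3) (by omega)]
    have hmlen : m < stairs.length := by omega
    have hval : max (dpF stairs (m - 2)) (dpF stairs (m - 3) + stairs.getD (m - 1) 0)
        + stairs.getD m 0 = dpF stairs m := by
      obtain ⟨k, rfl⟩ : ∃ k, m = k + 3 := ⟨m - 3, by omega⟩
      have ea : k + 3 - 2 = k + 1 := by omega
      have eb : k + 3 - 3 = k := by omega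
      have ec : k + 3 - 1 = k + 2 := by omega
      rw [ea, eb, ec]
      conv_rhs => rw [dpF]
    constructor
    · simpa using hlen
    · intro j hj
      rcases Nat.lt_succ_iff_lt_or_eq.mp hj with hj' | rfl
      · rw [List.getD, List.getElem?_set]
        simp only [hlen, hmlen, if_true]
        rw [if_neg (by omega)]
        exact hinv j hj'
      · rw [List.getD, List.getElem?_set, if_pos rfl, if_pos (by rw [hlen]; exact hmlen)]
        simpa using hval

lemma a_eq_dpF (stairs : List Int) (hn : 3 ≤ stairs.length) :
    max_score_of_stairs stairs = dpF stairs (stairs.length - 1) := by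
  unfold max_score_of_stairs
  have h0 : ((stairs.length : Int) == 0) = false := by rw [beq_eq_false_iff_ne]; omega
  have h1 : ((stairs.length : Int) == 1) = false := by rw [beq_eq_false_iff_ne]; omega
  have h2 : ((stairs.length : Int) == 2) = false := by rw [beq_eq_false_iff_ne]; omega
  simp only [h0, h1, h2, if_false, Bool.false_eq_true]
  obtain ⟨hlen, hinv⟩ := aloop stairs hn stairs.length hn (le_refl _)
  have hne : (List.foldl (fun dp i =>
        PySem.List.pySetD dp i
          (max (PySem.List.pyGetD dp (i - 2) 0)
               (PySem.List.pyGetD dp (i - 3) 0 + PySem.List.pyGetD stairs (i - 1) 0)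
           + PySem.List.pyGetD stairs i 0))
        (PySem.List.pySetD (PySem.List.pySetD (PySem.List.pySetD (List.replicate stairs.length 0)
            0 (PySem.List.pyGetD stairs 0 0))
            1 (PySem.List.pyGetD stairs 0 0 + PySem.List.pyGetD stairs 1 0))
            2 (max (PySem.List.pyGetD stairs 0 0 + PySem.List.pyGetD stairs 2 0)
                   (PySem.List.pyGetD stairs 1 0 + PySem.List.pyGetD stairs 2 0)))
        (PySem.List.pyRange 3 (stairs.length : Int) 1)) ≠ [] := by
    intro hnil
    rw [hnil] at hlen
    simp at hlen
    omega
  rw [PySem.List.pyGetD_neg_one _ 0 hne, List.getLast_eq_getElem]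
  have hfin := hinv (stairs.length - 1) (by omega)
  rw [List.getD, List.getElem?_eq_getElem (by rw [hlen]; omega)] at hfin
  simp only [Option.getD_some] at hfin
  rw [← hfin]
  congr 1
  rw [hlen]

lemma sum_take_succ (l : List Int) (k : Nat) (h : k < l.length) :
    (l.take (k+1)).sum = (l.take k).sum + l.getD k 0 := by
  have h1 : l.take (k+1) = l.take k ++ [l[k]] := by
    rw [List.take_add_one, List.getElem?_eq_getElem h]
    rfl
  rw [h1, List.sum_append, List.sum_cons, List.sum_nil, List.getD, List.getElem?_eq_getElem h]
  simp

-- the complement identity: A's max-DP equals prefix sum minus B's min-skip DP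
lemma key (stairs : List Int) :
    ∀ k, k + 2 < stairs.length →
      dpF stairs (k + 2) = (stairs.take (k + 3)).sum - min (mF stairs (k + 1)) (mF stairs k) := by
  intro k
  induction k using Nat.strong_induction_on with
  | _ k ih =>
    intro hk
    match k with
    | 0 =>
      have t1 := sum_take_succ stairs 0 (by omega)
      have t2 := sum_take_succ stairs 1 (by omega)
      have t3 := sum_take_succ stairs 2 (by omega)
      simp only [dpF, mF]
      simp only [List.take_zero, List.sum_nil] at t1
      simp only [Nat.reduceAdd] at *
      omega
    | 1 =>
      have t1 := sum_take_succ stairs 0 (by omega)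
      have t2 := sum_take_succ stairs 1 (by omega)
      have t3 := sum_take_succ stairs 2 (by omega)
      have t4 := sum_take_succ stairs 3 (by omega)
      simp only [dpF, mF]
      simp only [List.take_zero, List.sum_nil] at t1
      simp only [Nat.reduceAdd] at *
      omega
    | 2 =>
      have t1 := sum_take_succ stairs 0 (by omega)
      have t2 := sum_take_succ stairs 1 (by omega)
      have t3 := sum_take_succ stairs 2 (by omega)
      have t4 := sum_take_succ stairs 3 (by omega)
      have t5 := sum_take_succ stairs 4 (by omega)
      simp only [dpF, mF]
      simp only [List.take_zero, List.sum_nil] at t1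
      simp only [Nat.reduceAdd] at *
      omega
    | (j + 3) =>
      have ih1 := ih (j + 1) (by omega) (by omega)
      have ih2 := ih j (by omega) (by omega)
      have t5 := sum_take_succ stairs (j + 4) (by omega)
      have t4 := sum_take_succ stairs (j + 3) (by omega)
      have hd : dpF stairs (j + 5) =
          max (dpF stairs (j + 3)) (dpF stairs (j + 2) + stairs.getD (j + 4) 0)
            + stairs.getD (j + 5) 0 := rfl
      have hm1 : mF stairs (j + 4) =
          stairs.getD (j + 4) 0 + min (mF stairs (j + 2)) (mF stairs (j + 1)) := rfl
      have hm2 : mF stairs (j + 3) =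
          stairs.getD (j + 3) 0 + min (mF stairs (j + 1)) (mF stairs j) := rfl
      show dpF stairs (j + 5) = (stairs.take (j + 6)).sum - min (mF stairs (j + 4)) (mF stairs (j + 3))
      rw [hd, hm1, hm2]
      have e1 : dpF stairs (j + 3) = dpF stairs ((j + 1) + 2) := rfl
      rw [e1, ih1, ih2]
      have e3 : (stairs.take (j + 6)).sum = (stairs.take (j + 5)).sum + stairs.getD (j + 5) 0 :=
        sum_take_succ stairs (j + 5) (by omega)
      have ea : j + 1 + 3 = j + 4 := by omega
      have eb : j + 1 + 1 = j + 2 := by omega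
      have ec : j + 3 + 1 = j + 4 := by omega
      have ed : j + 4 + 1 = j + 5 := by omega
      simp only [ea, eb, ed] at *
      omega

lemma take_eq_map_range (l : List Int) (m : Nat) (h : m ≤ l.length) :
    l.take m = (List.range m).map (fun j => l.getD j 0) := by
  apply List.ext_getElem
  · simp [Nat.min_eq_left h]
  · intro j h1 h2
    simp only [List.length_take] at h1
    have hj : j < l.length := by omega
    simp [List.getElem_take, List.getD, List.getElem?_eq_getElem hj]

lemma getD_map_range_mF (stairs : List Int) (m j : Nat) (h : j < m) :
    (((List.range m).map (fun j => mF stairs j)).getD j 0) = mF stairs j := by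
  rw [List.getD, List.getElem?_map, List.getElem?_range h]
  rfl

lemma bloop (stairs : List Int) (_hn : 4 ≤ stairs.length) :
    ∀ (m : Nat), 3 ≤ m → m ≤ stairs.length - 1 →
      ((PySem.List.pyRange 3 (m : Int) 1).foldl (fun skip i =>
        skip ++ [PySem.List.pyGetD stairs i 0
                  + min (PySem.List.pyGetD skip (i - 2) 0) (PySem.List.pyGetD skip (i - 3) 0)])
        ((List.range 3).map (fun j => mF stairs j)))
      = (List.range m).map (fun j => mF stairs j) := by
  intro m hm
  induction m, hm using Nat.le_induction with
  | base =>
    intro _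
    rw [show ((3:Nat):Int) = 3 by norm_num, PySem.List.pyRange_one_eq_nil (le_refl 3)]
    rfl
  | succ m hm ih =>
    intro hle
    rw [show (((m+1:Nat)):Int) = ((m:Nat):Int) + 1 by push_cast; ring,
        PySem.List.pyRange_one_succ_right (by omega), List.foldl_append, List.foldl_cons,
        List.foldl_nil, ih (by omega)]
    have e2 : ((m:Int) - 2) = (((m-2:Nat)):Int) := by omega
    have e3 : ((m:Int) - 3) = (((m-3:Nat)):Int) := by omega
    rw [e2, e3, PySem.List.pyGetD_natCast, PySem.List.pyGetD_natCast, PySem.List.pyGetD_natCast,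
        getD_map_range_mF stairs m (m-2) (by omega), getD_map_range_mF stairs m (m-3) (by omega)]
    rw [List.range_succ, List.map_append]
    congr 1
    obtain ⟨k, rfl⟩ : ∃ k, m = k + 3 := ⟨m - 3, by omega⟩
    have ea : k + 3 - 2 = k + 1 := by omega
    have eb : k + 3 - 3 = k := by omega
    rw [ea, eb]
    have : mF stairs (k + 3) = stairs.getD (k + 3) 0 + min (mF stairs (k + 1)) (mF stairs k) := rfl
    simp [this]

lemma b_eq (stairs : List Int) (hn : 3 ≤ stairs.length) :
    max_score_of_stairs_alt stairs
      = stairs.sum - min (mF stairs (stairs.length - 2)) (mF stairs (stairs.length - 3)) := by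
  unfold max_score_of_stairs_alt
  have h0 : ((stairs.length : Int) == 0) = false := by rw [beq_eq_false_iff_ne]; omega
  have h1 : ((stairs.length : Int) == 1) = false := by rw [beq_eq_false_iff_ne]; omega
  have h2 : ((stairs.length : Int) == 2) = false := by rw [beq_eq_false_iff_ne]; omega
  simp only [h0, h1, h2, if_false, Bool.false_eq_true]
  have en1 : ((stairs.length : Int) - 1) = (((stairs.length - 1 : Nat)):Int) := by omega
  rw [en1, PySem.List.slice_to_natCast]
  have hsl : PySem.List.slice (List.take (stairs.length - 1) stairs) none (some (3:Int))
      = List.take (min 3 (stairs.length - 1)) stairs := by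
    rw [PySem.List.slice_to _ (show (0:Int) ≤ 3 by norm_num), List.take_take]
    rfl
  rw [hsl]
  by_cases h4 : 4 ≤ stairs.length
  · have hmin : min 3 (stairs.length - 1) = 3 := by omega
    rw [hmin]
    have hinit : stairs.take 3 = (List.range 3).map (fun j => mF stairs j) := by
      rw [take_eq_map_range stairs 3 (by omega)]
      apply List.map_congr_left
      intro j hj
      simp only [List.mem_range] at hj
      interval_cases j <;> rfl
    rw [hinit, bloop stairs h4 (stairs.length - 1) (by omega) (le_refl _)]
    have hlenr : ((List.range (stairs.length - 1)).map (fun j => mF stairs j)).length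
        = stairs.length - 1 := by simp
    rw [PySem.List.pyGetD_neg_ofNat _ 1 0 (by omega) (by rw [hlenr]; omega),
        PySem.List.pyGetD_neg_ofNat _ 2 0 (by omega) (by rw [hlenr]; omega)]
    simp only [hlenr, List.getElem_map, List.getElem_range]
    congr 2
  · have hn3 : stairs.length = 3 := by omega
    have hmin : min 3 (stairs.length - 1) = 2 := by omega
    rw [hmin, hn3, show (((3:Nat) - 1 : Nat):Int) = 2 by norm_num,
        PySem.List.pyRange_one_eq_nil (show (2:Int) ≤ 3 by norm_num), List.foldl_nil]
    have hinit : stairs.take 2 = (List.range 2).map (fun j => mF stairs j) := by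
      rw [take_eq_map_range stairs 2 (by omega)]
      apply List.map_congr_left
      intro j hj
      simp only [List.mem_range] at hj
      interval_cases j <;> rfl
    rw [hinit]
    rw [PySem.List.pyGetD_neg_ofNat _ 1 0 (by omega) (by simp),
        PySem.List.pyGetD_neg_ofNat _ 2 0 (by omega) (by simp)]
    norm_num [List.getElem_map, List.getElem_range]

-- ===== VERDICT (by name: the statement is the Claim_ definition above) =====
theorem max_score_of_stairs_spec : Claim_equal_max_score_of_stairs := by
  intro stairs _
  unfold Spec_max_score_of_stairs
  by_cases h3 : 3 ≤ stairs.length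
  · rw [a_eq_dpF stairs h3, b_eq stairs h3]
    obtain ⟨k, hk⟩ : ∃ k, stairs.length = k + 3 := ⟨stairs.length - 3, by omega⟩
    have e1 : stairs.length - 1 = k + 2 := by omega
    have e2 : stairs.length - 2 = k + 1 := by omega
    have e3 : stairs.length - 3 = k := by omega
    rw [e1, e2, e3, key stairs k (by omega)]
    have : stairs.take (k + 3) = stairs := by rw [← hk]; exact List.take_length
    rw [this]
  · interval_cases h : stairs.length <;>
      (match stairs, h with
        | [], _ => rfl
        | [a], _ => rfl
        | [a, b], _ => rfl)
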